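-- pv_equiv track=rewrite | github.com/hassanrasool-snapdev/superconnectoraiv2 | backend/auto_import_google_sheets.py | extract_sheet_id_from_url
-- ===== SOURCE A (Python) =====
-- def extract_sheet_id_from_url(url):
--     """Extract Google Sheets ID from various URL formats"""
--     if '/spreadsheets/d/' in url:
--         sheet_id = url.split('/spreadsheets/d/')[1].split('/')[0]
--         return sheet_id
--     elif 'docs.google.com' in url:
--         parts = url.split('/')
--         for i, part in enumerate(parts):
--             if part == 'd' and i + 1 < len(parts):
--                 return parts[i + 1]
--     return None
-- ===== SOURCE B (Python) =====
-- def _head_segment(s):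
--     j = s.find('/')
--     return s if j == -1 else s[:j]
--
--
-- def extract_sheet_id_from_url(url):
--     """Extract Google Sheets ID from various URL formats"""
--     marker = '/spreadsheets/d/'
--     i = url.find(marker)
--     if i != -1:
--         return _head_segment(url[i + len(marker):])
--     if 'docs.google.com' in url:
--         # prepend '/' so every path segment, the first included, is slash-delimited
--         m = ('/' + url).find('/d/')
--         if m != -1:
--             return _head_segment(url[m + 2:])
--     return None
-- ===== Notes on version B (the rewrite author's own statement) =====
-- stated objective: simpler
-- what changed: Replaces both split-into-lists passes (split on the marker / split on '/' plus an indexed scan of the parts list) by direct find/slice arithmetic: locate the marker, or the first slash-delimited 'd' segment (found as '/d/' in the slash-normalized path), and slice out the characters up to the next '/'; no list of parts is ever built.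
import Mathlib
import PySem

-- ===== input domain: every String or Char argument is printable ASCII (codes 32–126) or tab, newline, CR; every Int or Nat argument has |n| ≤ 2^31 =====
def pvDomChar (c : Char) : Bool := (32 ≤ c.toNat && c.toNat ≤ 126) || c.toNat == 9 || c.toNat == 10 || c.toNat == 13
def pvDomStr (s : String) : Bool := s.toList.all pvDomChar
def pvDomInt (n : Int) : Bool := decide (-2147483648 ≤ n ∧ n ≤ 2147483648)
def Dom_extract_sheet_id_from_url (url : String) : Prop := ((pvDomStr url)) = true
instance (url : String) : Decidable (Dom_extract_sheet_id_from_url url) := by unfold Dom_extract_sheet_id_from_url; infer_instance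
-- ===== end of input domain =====

-- B replaces A's two split-into-lists passes by direct find/slice index arithmetic (objective: simpler).

-- ===== PORT A =====
-- the loop 'for i, part in enumerate(parts): if part == 'd' and i + 1 < len(parts): return parts[i+1]'
def pvLoopA : List (List Char) → Option (List Char)
  | [] => none
  | p :: rest => if p = ['d'] ∧ rest ≠ [] then some (rest.headD []) else pvLoopA rest

def extract_sheet_id_from_url (url : String) : Option String :=
  if PySem.Str.isIn "/spreadsheets/d/" url then
    -- sheet_id = url.split('/spreadsheets/d/')[1].split('/')[0]  (both indexings in range under the guard)
    let parts := PySem.Chars.splitOn url.toList "/spreadsheets/d/".toList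
    let after := PySem.List.pyGetD parts 1 []
    let sheet_id := PySem.List.pyGetD (PySem.Chars.splitOn after ['/']) 0 []
    some (String.ofList sheet_id)
  else if PySem.Str.isIn "docs.google.com" url then
    (pvLoopA (PySem.Chars.splitOn url.toList ['/'])).map String.ofList
  else
    none

-- ===== PORT B =====
-- _head_segment: j = s.find('/'); s if j == -1 else s[:j]
def pvHeadSeg (s : List Char) : List Char :=
  let j := PySem.Chars.find s ['/']
  if j = -1 then s else PySem.List.slice s none (some j)

def extract_sheet_id_from_url_alt (url : String) : Option String :=
  -- i = url.find('/spreadsheets/d/'); len of the marker is 16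
  let i := PySem.Str.find url "/spreadsheets/d/"
  if i ≠ -1 then
    some (String.ofList (pvHeadSeg (PySem.List.slice url.toList (some (i + 16)) none)))
  else if PySem.Str.isIn "docs.google.com" url then
    -- m = ('/' + url).find('/d/'); url[m + 2:] (note: index m is into '/' + url)
    let m := PySem.Chars.find ('/' :: url.toList) ['/', 'd', '/']
    if m ≠ -1 then
      some (String.ofList (pvHeadSeg (PySem.List.slice url.toList (some (m + 2)) none)))
    else none
  else
    none

-- ===== PRECONDITION & SPEC =====
def Spec_extract_sheet_id_from_url (url : String) (out : Option String) : Prop := out = extract_sheet_id_from_url_alt url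
instance (url : String) (out : Option String) : Decidable (Spec_extract_sheet_id_from_url url out) := by unfold Spec_extract_sheet_id_from_url; infer_instance

-- ===== CLAIM (what is proved, stated in full; the proofs are below) =====
def Claim_equal_extract_sheet_id_from_url : Prop := ∀ (url : String), Dom_extract_sheet_id_from_url url → Spec_extract_sheet_id_from_url url (extract_sheet_id_from_url url)

-- ===== LEMMAS AND PROOFS =====

theorem pv_find_cases (s sub : List Char) :
    PySem.Chars.find s sub = -1 ∨ 0 ≤ PySem.Chars.find s sub := by
  have := PySem.Chars.neg_one_le_find s sub; omega

theorem pv_find_eq_of (s sub : List Char) (j : Nat) (h1 : sub <+: s.drop j)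
    (h2 : ∀ i < j, ¬ sub <+: s.drop i) : PySem.Chars.find s sub = (j : Int) := by
  have hin : PySem.Chars.isIn sub s = true :=
    (PySem.Chars.exists_prefix_drop_iff_isIn sub s).1 ⟨j, h1⟩
  have h0 : 0 ≤ PySem.Chars.find s sub :=
    (PySem.Chars.find_nonneg_iff s sub).2 ((PySem.Chars.isIn_iff_infix sub s).1 hin)
  obtain ⟨hp, hmin⟩ := PySem.Chars.find_spec h0
  rcases lt_trichotomy (PySem.Chars.find s sub).toNat j with hlt | heq | hgt
  · exact absurd hp (h2 _ hlt)
  · omega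
  · exact absurd h1 (hmin j hgt)

theorem pv_find_neg_of (s sub : List Char) (h : ∀ i : Nat, ¬ sub <+: s.drop i) :
    PySem.Chars.find s sub = -1 := by
  rw [PySem.Chars.find_eq_neg_one_iff]
  intro hinf
  obtain ⟨j, hj⟩ := (PySem.Chars.exists_prefix_drop_iff_isIn _ _).2
    ((PySem.Chars.isIn_iff_infix _ _).2 hinf)
  exact h j hj

theorem pv_singleton_prefix_drop (c : Char) (l : List Char) (i : Nat) :
    [c] <+: l.drop i ↔ l[i]? = some c := by
  rw [← List.head?_drop]
  cases hd : l.drop i with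
  | nil => simp
  | cons a t => simp [List.cons_prefix_cons, eq_comm]

theorem pv_find_char_eq (l : List Char) (c : Char) (j : Nat) (h1 : l[j]? = some c)
    (h2 : ∀ i : Nat, i < j → l[i]? ≠ some c) : PySem.Chars.find l [c] = (j : Int) := by
  refine pv_find_eq_of l [c] j ((pv_singleton_prefix_drop c l j).2 h1) ?_
  intro i hi hp
  exact h2 i hi ((pv_singleton_prefix_drop c l i).1 hp)

theorem pv_find_char_neg (l : List Char) (c : Char) (h : ∀ i : Nat, l[i]? ≠ some c) :
    PySem.Chars.find l [c] = -1 := by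
  refine pv_find_neg_of l [c] ?_
  intro i hp
  exact h i ((pv_singleton_prefix_drop c l i).1 hp)

theorem pv_no_char (l : List Char) (c : Char) (h : PySem.Chars.find l [c] = -1) :
    ∀ i : Nat, l[i]? ≠ some c := by
  intro i hi
  have hp : [c] <+: l.drop i := (pv_singleton_prefix_drop c l i).2 hi
  have hin : PySem.Chars.isIn [c] l = true :=
    (PySem.Chars.exists_prefix_drop_iff_isIn _ _).1 ⟨i, hp⟩
  have := (PySem.Chars.find_nonneg_iff l [c]).2 ((PySem.Chars.isIn_iff_infix _ _).1 hin)
  omega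

theorem pv_occ_head (sub : List Char) (c : Char) (t : List Char) (g : Nat)
    (hsub : sub.head? = some c) (hp : sub <+: t.drop g) : t[g]? = some c := by
  cases sub with
  | nil => simp at hsub
  | cons a su =>
    obtain rfl : a = c := by simpa using hsub
    have hne : t.drop g ≠ [] := by
      intro hnil
      rw [hnil, List.prefix_nil] at hp
      simp at hp
    have hlt : g < t.length := by
      by_contra hge
      exact hne (List.drop_eq_nil_iff.2 (by omega))
    rw [List.drop_eq_getElem_cons hlt] at hp
    have hac := (List.cons_prefix_cons.1 hp).1
    rw [List.getElem?_eq_getElem hlt, ← hac]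

theorem pv_drop_cons (l : List Char) (i : Nat) (c : Char) (h : l[i]? = some c) :
    l.drop i = c :: l.drop (i + 1) := by
  have hlt : i < l.length := by
    by_contra hge
    rw [List.getElem?_eq_none (by omega)] at h
    simp at h
  rw [List.drop_eq_getElem_cons hlt]
  have := List.getElem?_eq_getElem hlt
  rw [this] at h
  simp only [Option.some.injEq] at h
  rw [h]

theorem pv_prefix3_drop (c₀ c₁ c₂ : Char) (l : List Char) (p : Nat) :
    [c₀, c₁, c₂] <+: l.drop p ↔
      l[p]? = some c₀ ∧ l[p+1]? = some c₁ ∧ l[p+2]? = some c₂ := by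
  constructor
  · intro hp
    obtain ⟨r, hr⟩ := hp
    have h0 : (l.drop p)[0]? = some c₀ := by rw [← hr]; rfl
    have h1 : (l.drop p)[1]? = some c₁ := by rw [← hr]; rfl
    have h2 : (l.drop p)[2]? = some c₂ := by rw [← hr]; rfl
    rw [List.getElem?_drop] at h0 h1 h2
    simp only [Nat.add_zero] at h0
    exact ⟨h0, h1, h2⟩
  · rintro ⟨h0, h1, h2⟩
    rw [pv_drop_cons l p c₀ h0, pv_drop_cons l (p+1) c₁ h1, pv_drop_cons l (p+2) c₂ h2]
    exact ⟨_, rfl⟩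

theorem pv_go_acc (sep : List Char) (hsep : sep ≠ []) (fuel : Nat) (l cur : List Char)
    (acc : List (List Char)) (hf : l.length < fuel) :
    PySem.Chars.splitOn.go sep fuel l cur acc
      = acc.reverse ++ PySem.Chars.splitOn.go sep fuel l cur [] := by
  have hslen : 1 ≤ sep.length := List.length_pos_iff.2 hsep
  induction fuel generalizing l cur acc with
  | zero => omega
  | succ f ih =>
    cases l with
    | nil =>
      rw [PySem.Chars.splitOn.go, PySem.Chars.splitOn.go]
      all_goals simp
    | cons c rest =>
      rw [PySem.Chars.splitOn.go]
      conv_rhs => rw [PySem.Chars.splitOn.go]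
      by_cases hp : sep.isPrefixOf (c :: rest) = true
      · rw [if_pos hp, if_pos hp]
        have hX : (List.drop sep.length (c :: rest)).length < f := by
          simp only [List.length_drop, List.length_cons] at *
          omega
        rw [ih _ _ (cur.reverse :: acc) hX, ih _ _ [cur.reverse] hX]
        simp
      · rw [if_neg hp, if_neg hp]
        exact ih _ _ _ (by simp only [List.length_cons] at hf; omega)

theorem pv_go_fuel (sep : List Char) (hsep : sep ≠ []) (fuel fuel' : Nat) (l cur : List Char)
    (acc : List (List Char)) (h : l.length < fuel) (h' : l.length < fuel') :
    PySem.Chars.splitOn.go sep fuel l cur acc = PySem.Chars.splitOn.go sep fuel' l cur acc := by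
  have hslen : 1 ≤ sep.length := List.length_pos_iff.2 hsep
  induction fuel generalizing fuel' l cur acc with
  | zero => omega
  | succ f ih =>
    cases fuel' with
    | zero => omega
    | succ f' =>
      cases l with
      | nil =>
        rw [PySem.Chars.splitOn.go, PySem.Chars.splitOn.go]
        all_goals simp
      | cons c rest =>
        rw [PySem.Chars.splitOn.go]
        conv_rhs => rw [PySem.Chars.splitOn.go]
        by_cases hp : sep.isPrefixOf (c :: rest) = true
        · rw [if_pos hp, if_pos hp]
          exact ih _ _ _ _ (by simp only [List.length_drop, List.length_cons] at *; omega)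
            (by simp only [List.length_drop, List.length_cons] at *; omega)
        · rw [if_neg hp, if_neg hp]
          exact ih _ _ _ _ (by simp only [List.length_cons] at h; omega)
            (by simp only [List.length_cons] at h'; omega)

theorem pv_go_no (sep : List Char) (_hsep : sep ≠ []) (fuel : Nat) (l cur : List Char)
    (acc : List (List Char)) (hf : l.length < fuel) (hno : ¬ sep <:+: l) :
    PySem.Chars.splitOn.go sep fuel l cur acc = acc.reverse ++ [cur.reverse ++ l] := by
  induction fuel generalizing l cur acc with
  | zero => omega
  | succ f ih =>
    cases l with
    | nil =>
      rw [PySem.Chars.splitOn.go]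
      all_goals simp
    | cons c rest =>
      have hp : ¬ sep.isPrefixOf (c :: rest) = true := by
        intro hpre
        exact hno (List.isPrefixOf_iff_prefix.1 hpre).isInfix
      rw [PySem.Chars.splitOn.go, if_neg hp]
      rw [ih rest (c :: cur) acc (by simp only [List.length_cons] at hf; omega)
        (fun hinf => hno (List.infix_cons hinf))]
      simp

theorem pv_go_found (sep : List Char) (hsep : sep ≠ []) (fuel : Nat) (j : Nat) (l cur : List Char)
    (acc : List (List Char)) (hf : l.length < fuel)
    (h1 : sep <+: l.drop j) (h2 : ∀ i < j, ¬ sep <+: l.drop i) :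
    PySem.Chars.splitOn.go sep fuel l cur acc
      = acc.reverse ++ (cur.reverse ++ l.take j) :: PySem.Chars.splitOn (l.drop (j + sep.length)) sep := by
  induction fuel generalizing j l cur acc with
  | zero => omega
  | succ f ih =>
    cases l with
    | nil =>
      rw [List.drop_nil, List.prefix_nil] at h1
      exact absurd h1 hsep
    | cons c rest =>
      have hslen : 1 ≤ sep.length := List.length_pos_iff.2 hsep
      cases j with
      | zero =>
        have hp : sep.isPrefixOf (c :: rest) = true :=
          List.isPrefixOf_iff_prefix.2 (by simpa using h1)
        rw [PySem.Chars.splitOn.go, if_pos hp]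
        have hXf : (List.drop sep.length (c :: rest)).length < f := by
          simp only [List.length_drop, List.length_cons] at *
          omega
        rw [pv_go_acc sep hsep f _ [] _ hXf]
        have hsp : PySem.Chars.splitOn (List.drop sep.length (c :: rest)) sep
            = PySem.Chars.splitOn.go sep f (List.drop sep.length (c :: rest)) [] [] := by
          unfold PySem.Chars.splitOn
          exact pv_go_fuel sep hsep _ f _ [] [] (by omega) hXf
        rw [← hsp]
        simp
      | succ k =>
        have hp : ¬ sep.isPrefixOf (c :: rest) = true := by
          intro hpre
          exact h2 0 (Nat.succ_pos k) (by simpa using List.isPrefixOf_iff_prefix.1 hpre)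
        rw [PySem.Chars.splitOn.go, if_neg hp]
        have h1' : sep <+: rest.drop k := by simpa [List.drop_succ_cons] using h1
        have h2' : ∀ i < k, ¬ sep <+: rest.drop i := by
          intro i hi
          simpa [List.drop_succ_cons] using h2 (i+1) (by omega)
        rw [ih k rest (c :: cur) acc (by simp only [List.length_cons] at hf; omega) h1' h2']
        simp [List.take_succ_cons, List.drop_succ_cons, Nat.add_right_comm]

theorem pv_splitOn_no (l sep : List Char) (hsep : sep ≠ []) (h : PySem.Chars.find l sep = -1) :
    PySem.Chars.splitOn l sep = [l] := by
  have hno : ¬ sep <:+: l := (PySem.Chars.find_eq_neg_one_iff l sep).1 h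
  unfold PySem.Chars.splitOn
  rw [pv_go_no sep hsep _ l [] [] (by omega) hno]
  simp

theorem pv_splitOn_found (l sep : List Char) (hsep : sep ≠ []) (h : 0 ≤ PySem.Chars.find l sep) :
    PySem.Chars.splitOn l sep
      = l.take (PySem.Chars.find l sep).toNat
        :: PySem.Chars.splitOn (l.drop ((PySem.Chars.find l sep).toNat + sep.length)) sep := by
  obtain ⟨hp, hmin⟩ := PySem.Chars.find_spec h
  have hdef : PySem.Chars.splitOn l sep = PySem.Chars.splitOn.go sep (l.length + 1) l [] [] := rfl
  rw [hdef, pv_go_found sep hsep _ _ l [] [] (by omega) hp hmin]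
  simp

theorem pv_splitOn_ne_nil (l sep : List Char) (hsep : sep ≠ []) :
    PySem.Chars.splitOn l sep ≠ [] := by
  rcases pv_find_cases l sep with h | h
  · rw [pv_splitOn_no l sep hsep h]
    simp
  · rw [pv_splitOn_found l sep hsep h]
    simp

theorem pv_pyGetD_zero {α : Type} (a : α) (ts : List α) (d : α) :
    PySem.List.pyGetD (a :: ts) 0 d = a := by
  simp [PySem.List.pyGetD, PySem.List.pyGet?, PySem.List.pyIdx?]

theorem pv_pyGetD_one {α : Type} (a : α) (ts : List α) (d : α) :
    PySem.List.pyGetD (a :: ts) 1 d = ts.headD d := by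
  cases ts with
  | nil => simp [PySem.List.pyGetD, PySem.List.pyGet?, PySem.List.pyIdx?]
  | cons b ts' =>
    simp [PySem.List.pyGetD, PySem.List.pyGet?, PySem.List.pyIdx?]

theorem pv_headSeg_eq (s : List Char) :
    pvHeadSeg s = if PySem.Chars.find s ['/'] = -1 then s
      else s.take (PySem.Chars.find s ['/']).toNat := by
  unfold pvHeadSeg
  rcases pv_find_cases s ['/'] with h | h
  · rw [if_pos h, if_pos h]
  · rw [if_neg (by omega), if_neg (by omega), PySem.List.slice_to s h]

theorem pv_head_splitOn_slash (t : List Char) :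
    (PySem.Chars.splitOn t ['/']).headD [] = pvHeadSeg t := by
  rcases pv_find_cases t ['/'] with h | h
  · rw [pv_splitOn_no t ['/'] (by decide) h, pv_headSeg_eq, if_pos h]
    rfl
  · rw [pv_splitOn_found t ['/'] (by decide) h, pv_headSeg_eq, if_neg (by omega)]
    rfl

theorem pv_first_piece (t : List Char) :
    PySem.List.pyGetD (PySem.Chars.splitOn t ['/']) 0 [] = pvHeadSeg t := by
  cases hsp : PySem.Chars.splitOn t ['/'] with
  | nil => exact absurd hsp (pv_splitOn_ne_nil t ['/'] (by decide))
  | cons a ts =>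
    have hh := pv_head_splitOn_slash t
    rw [hsp] at hh
    rw [pv_pyGetD_zero]
    simpa using hh

theorem pv_headSeg_take (t : List Char) (g : Nat) (hg : t[g]? = some '/') :
    pvHeadSeg (t.take g) = pvHeadSeg t := by
  have hp0 : ['/'] <+: t.drop g := (pv_singleton_prefix_drop _ _ _).2 hg
  have hin : PySem.Chars.isIn ['/'] t = true :=
    (PySem.Chars.exists_prefix_drop_iff_isIn _ _).1 ⟨g, hp0⟩
  have h0 : 0 ≤ PySem.Chars.find t ['/'] :=
    (PySem.Chars.find_nonneg_iff _ _).2 ((PySem.Chars.isIn_iff_infix _ _).1 hin)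
  obtain ⟨hp, hmin⟩ := PySem.Chars.find_spec h0
  have hocc : t[(PySem.Chars.find t ['/']).toNat]? = some '/' :=
    (pv_singleton_prefix_drop _ _ _).1 hp
  have hminc : ∀ i : Nat, i < (PySem.Chars.find t ['/']).toNat → t[i]? ≠ some '/' :=
    fun i hi hc => hmin i hi ((pv_singleton_prefix_drop _ _ _).2 hc)
  have hne : ¬ PySem.Chars.find t ['/'] = -1 := by omega
  have hjg : (PySem.Chars.find t ['/']).toNat ≤ g := by
    by_contra hlt
    exact hminc g (by omega) hg
  rcases Nat.lt_or_eq_of_le hjg with hlt | heq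
  · have hf : PySem.Chars.find (t.take g) ['/'] = ((PySem.Chars.find t ['/']).toNat : Int) := by
      apply pv_find_char_eq
      · rw [List.getElem?_take, if_pos hlt]
        exact hocc
      · intro i hi hc
        rw [List.getElem?_take, if_pos (by omega)] at hc
        exact hminc i hi hc
    rw [pv_headSeg_eq (t.take g), pv_headSeg_eq t, hf, if_neg (by omega), if_neg hne]
    rw [Int.toNat_natCast, List.take_take]
    congr 1
    omega
  · have hf : PySem.Chars.find (t.take g) ['/'] = -1 := by
      apply pv_find_char_neg
      intro i hc
      rw [List.getElem?_take] at hc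
      by_cases hig : i < g
      · rw [if_pos hig] at hc
        exact hminc i (by omega) hc
      · rw [if_neg hig] at hc
        simp at hc
    rw [pv_headSeg_eq (t.take g), pv_headSeg_eq t, hf, if_pos rfl, if_neg hne, ← heq]

theorem pv_branch1 (cs : List Char) (h : 0 ≤ PySem.Chars.find cs "/spreadsheets/d/".toList) :
    PySem.List.pyGetD
        (PySem.Chars.splitOn
          (PySem.List.pyGetD (PySem.Chars.splitOn cs "/spreadsheets/d/".toList) 1 []) ['/']) 0 []
      = pvHeadSeg (cs.drop ((PySem.Chars.find cs "/spreadsheets/d/".toList).toNat + 16)) := by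
  have hMne : "/spreadsheets/d/".toList ≠ [] := by decide
  have hMlen : "/spreadsheets/d/".toList.length = 16 := by decide
  rw [pv_splitOn_found cs "/spreadsheets/d/".toList hMne h, pv_pyGetD_one, hMlen]
  rcases pv_find_cases (cs.drop ((PySem.Chars.find cs "/spreadsheets/d/".toList).toNat + 16))
      "/spreadsheets/d/".toList with h2 | h2
  · rw [pv_splitOn_no _ _ hMne h2]
    simp only [List.headD_cons]
    exact pv_first_piece _
  · rw [pv_splitOn_found _ _ hMne h2]
    simp only [List.headD_cons]
    rw [pv_first_piece]
    obtain ⟨hp, _⟩ := PySem.Chars.find_spec h2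
    exact pv_headSeg_take _ _ (pv_occ_head "/spreadsheets/d/".toList '/' _ _ (by decide) hp)

-- the '/'-prepended view: occurrences of '/d/' in '/'::cs
theorem pv_occ_s (cs : List Char) (p : Nat) :
    ['/', 'd', '/'] <+: ('/' :: cs).drop p ↔
      (('/' :: cs)[p]? = some '/' ∧ ('/' :: cs)[p+1]? = some 'd' ∧ ('/' :: cs)[p+2]? = some '/') :=
  pv_prefix3_drop '/' 'd' '/' ('/' :: cs) p

theorem pv_branch2_aux : ∀ (n : Nat) (cs : List Char), cs.length < n →
    pvLoopA (PySem.Chars.splitOn cs ['/'])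
      = (if PySem.Chars.find ('/' :: cs) ['/', 'd', '/'] ≠ -1 then
          some (pvHeadSeg (PySem.List.slice cs
            (some (PySem.Chars.find ('/' :: cs) ['/', 'd', '/'] + 2)) none))
        else none) := by
  intro n
  induction n with
  | zero => intro cs h; omega
  | succ m ih =>
    intro cs hcs
    rcases pv_find_cases cs ['/'] with h | h
    -- no '/' at all in cs: the loop never fires, and '/'::cs contains no '/d/'
    · have hnoc : ∀ i : Nat, cs[i]? ≠ some '/' := pv_no_char cs '/' h
      have hfm : PySem.Chars.find ('/' :: cs) ['/', 'd', '/'] = -1 := by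
        refine pv_find_neg_of _ _ ?_
        intro p hp
        obtain ⟨_, _, h2⟩ := (pv_occ_s cs p).1 hp
        have : cs[p+1]? = some '/' := by simpa using h2
        exact hnoc (p+1) this
      rw [pv_splitOn_no cs ['/'] (by decide) h, hfm]
      simp [pvLoopA]
    · obtain ⟨hp, hmin⟩ := PySem.Chars.find_spec h
      have hocc : cs[(PySem.Chars.find cs ['/']).toNat]? = some '/' :=
        (pv_singleton_prefix_drop _ _ _).1 hp
      have hminc : ∀ i : Nat, i < (PySem.Chars.find cs ['/']).toNat → cs[i]? ≠ some '/' :=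
        fun i hi hc => hmin i hi ((pv_singleton_prefix_drop _ _ _).2 hc)
      set j := (PySem.Chars.find cs ['/']).toNat with hj
      have hjlt : j < cs.length := by
        by_contra hge
        rw [List.getElem?_eq_none (by omega)] at hocc
        simp at hocc
      have hdc : cs.drop j = '/' :: cs.drop (j + 1) := pv_drop_cons _ _ _ hocc
      have hts : PySem.Chars.splitOn (cs.drop (j + 1)) ['/'] ≠ [] :=
        pv_splitOn_ne_nil _ _ (by decide)
      rw [pv_splitOn_found cs ['/'] (by decide) h]
      simp only [List.length_cons, List.length_nil, Nat.zero_add, ← hj]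
      -- the tail of '/'::cs from j+1 is '/'::(cs.drop (j+1))
      have hsdrop : ('/' :: cs).drop (j + 1) = '/' :: cs.drop (j + 1) := by
        simp only [List.drop_succ_cons]
        exact hdc
      by_cases hd : cs.take j = ['d']
      -- first segment equal to 'd' with a following '/': '/d/' occurs at position 0 of '/'::cs
      · rw [pvLoopA, if_pos ⟨hd, hts⟩]
        have hj1 : j = 1 := by
          have hlen := congrArg List.length hd
          simp only [List.length_take, List.length_cons, List.length_nil] at hlen
          omega
        have h0 : cs[0]? = some 'd' := by
          have := congrArg (fun l => l[0]?) hd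
          simp only [List.getElem?_take, hj1] at this
          simpa using this
        have hfm : PySem.Chars.find ('/' :: cs) ['/', 'd', '/'] = ((0 : Nat) : Int) := by
          refine pv_find_eq_of _ _ 0 ?_ (by omega)
          refine (pv_occ_s cs 0).2 ⟨rfl, by simpa using h0, by simpa using (hj1 ▸ hocc)⟩
        rw [hfm]
        rw [if_pos (by omega : ¬ ((0 : Nat) : Int) = -1)]
        rw [PySem.List.slice_from cs (by omega : (0:Int) ≤ ((0 : Nat) : Int) + 2)]
        rw [pv_head_splitOn_slash]
        congr 1
        rw [hj1]
        rfl
      · rw [pvLoopA, if_neg (fun hc => hd hc.1)]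
        have hlen : (cs.drop (j + 1)).length < m := by
          simp only [List.length_drop]
          omega
        rw [ih _ hlen]
        -- no '/d/' occurrence in '/'::cs at a position ≤ j
        have hnolow : ∀ p : Nat, p ≤ j → ¬ ['/', 'd', '/'] <+: ('/' :: cs).drop p := by
          intro p hpj hpre
          obtain ⟨h0, h1, h2⟩ := (pv_occ_s cs p).1 hpre
          cases p with
          | zero =>
            have hc0 : cs[0]? = some 'd' := by simpa using h1
            have hc1 : cs[1]? = some '/' := by simpa using h2
            have hj1 : j ≤ 1 := by
              by_contra hgt
              exact hminc 1 (by omega) hc1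
            interval_cases j
            · rw [hc0] at hocc
              simp at hocc
            · apply hd
              have hne0 : cs ≠ [] := by intro hh; rw [hh] at hc0; simp at hc0
              cases cs with
              | nil => exact absurd rfl hne0
              | cons a t =>
                obtain rfl : a = 'd' := by simpa using hc0
                rfl
          | succ q =>
            have : cs[q]? = some '/' := by simpa using h0
            exact hminc q (by omega) this
        -- occurrences at p ≥ j+1 shift to '/'::(cs.drop (j+1))
        rcases pv_find_cases ('/' :: cs.drop (j + 1)) ['/', 'd', '/'] with hm | hm
        · have hfm : PySem.Chars.find ('/' :: cs) ['/', 'd', '/'] = -1 := by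
            refine pv_find_neg_of _ _ ?_
            intro p hpre
            by_cases hple : p ≤ j
            · exact hnolow p hple hpre
            · have hsplit : ('/' :: cs).drop p = ('/' :: cs.drop (j + 1)).drop (p - (j + 1)) := by
                rw [← hsdrop, List.drop_drop]
                congr 1
                omega
              rw [hsplit] at hpre
              have hno : ¬ ['/', 'd', '/'] <:+: ('/' :: cs.drop (j + 1)) :=
                (PySem.Chars.find_eq_neg_one_iff _ _).1 hm
              exact hno ((PySem.Chars.isIn_iff_infix _ _).1
                ((PySem.Chars.exists_prefix_drop_iff_isIn _ _).1 ⟨_, hpre⟩))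
          rw [hfm, hm]
          simp
        · obtain ⟨hpt, hmint⟩ := PySem.Chars.find_spec hm
          set k := (PySem.Chars.find ('/' :: cs.drop (j + 1)) ['/', 'd', '/']).toNat with hk
          have hfm : PySem.Chars.find ('/' :: cs) ['/', 'd', '/'] = ((j + 1 + k : Nat) : Int) := by
            refine pv_find_eq_of _ _ (j + 1 + k) ?_ ?_
            · rw [show ('/' :: cs).drop (j + 1 + k) = ('/' :: cs.drop (j + 1)).drop k by
                rw [← hsdrop, List.drop_drop]]
              exact hpt
            · intro i hi hpre
              by_cases hple : i ≤ j
              · exact hnolow i hple hpre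
              · have hsplit : ('/' :: cs).drop i = ('/' :: cs.drop (j + 1)).drop (i - (j + 1)) := by
                  rw [← hsdrop, List.drop_drop]
                  congr 1
                  omega
                rw [hsplit] at hpre
                exact hmint _ (by omega) hpre
          rw [hfm]
          rw [if_pos (by omega : ¬ ((j + 1 + k : Nat) : Int) = -1)]
          rw [if_pos (by omega : ¬ PySem.Chars.find ('/' :: cs.drop (j + 1)) ['/', 'd', '/'] = -1)]
          rw [PySem.List.slice_from _ (by omega : (0:Int) ≤ ((j + 1 + k : Nat) : Int) + 2)]
          rw [PySem.List.slice_from _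
            (by omega : (0:Int) ≤ PySem.Chars.find ('/' :: cs.drop (j + 1)) ['/', 'd', '/'] + 2)]
          rw [List.drop_drop]
          rw [show ((((j + 1 + k : Nat) : Int) + 2).toNat)
              = (j + 1) + ((PySem.Chars.find ('/' :: cs.drop (j + 1)) ['/', 'd', '/']) + 2).toNat
            from by omega]

theorem pv_branch2 (cs : List Char) :
    pvLoopA (PySem.Chars.splitOn cs ['/'])
      = (if PySem.Chars.find ('/' :: cs) ['/', 'd', '/'] ≠ -1 then
          some (pvHeadSeg (PySem.List.slice cs
            (some (PySem.Chars.find ('/' :: cs) ['/', 'd', '/'] + 2)) none))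
        else none) :=
  pv_branch2_aux (cs.length + 1) cs (by omega)

-- ===== VERDICT (by name: the statement is the Claim_ definition above) =====
theorem extract_sheet_id_from_url_spec : Claim_equal_extract_sheet_id_from_url := by
  intro url _
  show extract_sheet_id_from_url url = extract_sheet_id_from_url_alt url
  unfold extract_sheet_id_from_url extract_sheet_id_from_url_alt
  rw [PySem.Str.isIn_eq, PySem.Str.find_eq]
  rcases pv_find_cases url.toList "/spreadsheets/d/".toList with h | h
  · have hii : PySem.Chars.isIn "/spreadsheets/d/".toList url.toList = false := by
      unfold PySem.Chars.isIn
      rw [h]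
      rfl
    rw [hii, if_neg (by omega : ¬ ¬ PySem.Chars.find url.toList "/spreadsheets/d/".toList = -1)]
    simp only [Bool.false_eq_true, if_false]
    by_cases hdg : PySem.Str.isIn "docs.google.com" url = true
    · rw [if_pos hdg, if_pos hdg, pv_branch2]
      by_cases hm : PySem.Chars.find ('/' :: url.toList) ['/', 'd', '/'] = -1
      · rw [if_neg (by omega : ¬ ¬ PySem.Chars.find ('/' :: url.toList) ['/', 'd', '/'] = -1),
          if_neg (by omega : ¬ ¬ PySem.Chars.find ('/' :: url.toList) ['/', 'd', '/'] = -1)]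
        rfl
      · rw [if_pos (by omega : ¬ PySem.Chars.find ('/' :: url.toList) ['/', 'd', '/'] = -1),
          if_pos (by omega : ¬ PySem.Chars.find ('/' :: url.toList) ['/', 'd', '/'] = -1)]
        rfl
    · rw [if_neg hdg, if_neg hdg]
  · have hii : PySem.Chars.isIn "/spreadsheets/d/".toList url.toList = true := by
      unfold PySem.Chars.isIn
      simp only [bne_iff_ne, ne_eq]
      omega
    rw [hii, if_pos (by omega : ¬ PySem.Chars.find url.toList "/spreadsheets/d/".toList = -1)]
    simp only [if_true]
    rw [pv_branch1 url.toList h]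
    rw [PySem.List.slice_from _ (by omega : (0:Int) ≤ PySem.Chars.find url.toList "/spreadsheets/d/".toList + 16)]
    have h16 : (PySem.Chars.find url.toList "/spreadsheets/d/".toList + 16).toNat
        = (PySem.Chars.find url.toList "/spreadsheets/d/".toList).toNat + 16 := by omega
    rw [h16]
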